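-- pv_equiv track=rewrite | github.com/44510/mwmbl | mwmbl/indexer/index.py | prepare_url_for_tokenizing
-- ===== SOURCE A (Python) =====
-- HTTP_START = 'http://'
--
-- HTTPS_START = 'https://'
--
-- def prepare_url_for_tokenizing(url: str):
--     if url.startswith(HTTP_START):
--         url = url[len(HTTP_START):]
--     elif url.startswith(HTTPS_START):
--         url = url[len(HTTPS_START):]
--     for c in '/._':
--         if c in url:
--             url = url.replace(c, ' ')
--     return url
-- ===== SOURCE B (Python) =====
-- def _strip_scheme(chars):
--     if chars[:7] == list('http://'):
--         return chars[7:]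
--     if chars[:8] == list('https://'):
--         return chars[8:]
--     return chars
--
-- def _translate(chars):
--     out = []
--     for c in chars:
--         out.append(' ' if c in '/._' else c)
--     return out
--
-- def prepare_url_for_tokenizing(url: str):
--     return ''.join(_translate(_strip_scheme(list(url))))
-- ===== Notes on version B (the rewrite author's own statement) =====
-- stated objective: alternative
-- what changed: Works on the explicit character list: the scheme prefix is removed by comparing and dropping a list slice instead of str.startswith on the string, and the three repeated str.replace scans are replaced by one character-level pass that emits a space for each separator character, joined once.
import Mathlib
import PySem

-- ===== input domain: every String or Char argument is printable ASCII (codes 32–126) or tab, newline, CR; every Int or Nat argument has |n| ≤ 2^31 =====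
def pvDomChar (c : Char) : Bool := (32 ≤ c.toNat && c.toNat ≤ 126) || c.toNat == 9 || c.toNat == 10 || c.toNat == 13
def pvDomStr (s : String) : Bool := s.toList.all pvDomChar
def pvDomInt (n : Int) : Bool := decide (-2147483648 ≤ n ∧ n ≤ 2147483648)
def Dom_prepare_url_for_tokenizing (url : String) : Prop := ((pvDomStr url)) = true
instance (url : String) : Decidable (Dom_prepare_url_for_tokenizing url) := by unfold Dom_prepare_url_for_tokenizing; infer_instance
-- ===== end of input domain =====

-- B works on the character list: slice-compare-and-drop for the scheme prefix and one
-- character-level translation pass instead of three repeated str.replace scans (alternative).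

-- ===== PORT A =====
def prepare_url_for_tokenizing (url : String) : String :=
  -- prefix stripping: url[len(HTTP_START):] with len('http://') = 7, len('https://') = 8
  let url :=
    if PySem.Str.startswith url "http://" then PySem.Str.slice url (some 7) none
    else if PySem.Str.startswith url "https://" then PySem.Str.slice url (some 8) none
    else url
  -- for c in '/._': if c in url: url = url.replace(c, ' ')  (the chars of '/._' as a list literal)
  List.foldl
    (fun u c => if PySem.Str.isIn (String.ofList [c]) u
                then PySem.Str.replace u (String.ofList [c]) " " else u)
    url ['/', '.', '_']

-- ===== PORT B =====
-- chars[:7] == list('http://') → take-compare; chars[7:] → drop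
def pvStripScheme (chars : List Char) : List Char :=
  if chars.take 7 = ['h','t','t','p',':','/','/'] then chars.drop 7
  else if chars.take 8 = ['h','t','t','p','s',':','/','/'] then chars.drop 8
  else chars

-- out = []; for c in chars: out.append(' ' if c in '/._' else c)
def pvTranslate (chars : List Char) : List Char :=
  chars.foldl (fun out c => out ++ [if c = '/' ∨ c = '.' ∨ c = '_' then ' ' else c]) []

def prepare_url_for_tokenizing_alt (url : String) : String :=
  String.ofList (pvTranslate (pvStripScheme url.toList))

-- ===== PRECONDITION & SPEC =====
def Spec_prepare_url_for_tokenizing (url : String) (out : String) : Prop := out = prepare_url_for_tokenizing_alt url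
instance (url : String) (out : String) : Decidable (Spec_prepare_url_for_tokenizing url out) := by unfold Spec_prepare_url_for_tokenizing; infer_instance

-- ===== CLAIM (what is proved, stated in full; the proofs are below) =====
def Claim_equal_prepare_url_for_tokenizing : Prop := ∀ (url : String), Dom_prepare_url_for_tokenizing url → Spec_prepare_url_for_tokenizing url (prepare_url_for_tokenizing url)

-- ===== LEMMAS AND PROOFS =====

-- single-character replace is a map over the characters
theorem replace_go_single (a b : Char) :
    ∀ (l : List Char) (fuel : Nat) (acc : List Char), l.length ≤ fuel →
      PySem.Chars.replace.go [a] [b] fuel l acc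
        = acc.reverse ++ l.map (fun c => if c = a then b else c) := by
  intro l
  induction l with
  | nil =>
      intro fuel acc _
      cases fuel <;> simp [PySem.Chars.replace.go]
  | cons c t ih =>
      intro fuel acc h
      cases fuel with
      | zero => simp at h
      | succ fuel =>
        by_cases hca : c = a
        · subst hca
          have : [c].isPrefixOf (c :: t) = true := by simp [List.isPrefixOf]
          simp only [PySem.Chars.replace.go, this, if_pos]
          rw [show List.drop [c].length (c :: t) = t from rfl,
              show [b].reverse ++ acc = b :: acc from rfl,
              ih fuel (b :: acc) (by simpa using Nat.le_of_succ_le_succ h)]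
          simp
        · have : [a].isPrefixOf (c :: t) = false := by
            simp [List.isPrefixOf]; exact fun hac => (hca hac.symm).elim
          simp only [PySem.Chars.replace.go, this]
          rw [ih fuel (c :: acc) (by simpa using Nat.le_of_succ_le_succ h)]
          simp [hca]

theorem replace_single (a b : Char) (cs : List Char) :
    PySem.Chars.replace cs [a] [b] = cs.map (fun c => if c = a then b else c) := by
  have := replace_go_single a b cs cs.length [] (le_refl _)
  simpa [PySem.Chars.replace] using this

-- if 'a in cs' is false then a is not a member
theorem mem_of_isIn_false (a : Char) (cs : List Char)
    (h : PySem.Chars.isIn [a] cs = false) : a ∉ cs := by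
  intro hmem
  have hinfix : [a] <:+: cs := by
    obtain ⟨s, t, rfl⟩ := List.append_of_mem hmem
    exact ⟨s, t, by simp⟩
  have hfind : PySem.Chars.find cs [a] = -1 := by
    simpa [PySem.Chars.isIn] using h
  have h0 := (PySem.Chars.findFrom_natCast_eq_neg_one_iff cs [a] 0 (Nat.zero_le _))
  simp only [Nat.cast_zero, List.drop_zero, PySem.Chars.findFrom_zero] at h0
  exact (h0.mp hfind) hinfix

-- one iteration of A's loop, as a map
theorem step_eq_map (a : Char) (u : String) :
    (if PySem.Str.isIn (String.ofList [a]) u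
     then PySem.Str.replace u (String.ofList [a]) " " else u)
      = String.ofList (u.toList.map (fun c => if c = a then ' ' else c)) := by
  by_cases h : PySem.Chars.isIn [a] u.toList
  · simp [PySem.Str.isIn, PySem.Str.replace, h, replace_single]
  · have hna := mem_of_isIn_false a u.toList (by simpa using h)
    have : u.toList.map (fun c => if c = a then ' ' else c) = u.toList := by
      refine (List.map_congr_left ?_).trans (List.map_id u.toList)
      intro c hc
      have hne : c ≠ a := fun hh => hna (hh ▸ hc)
      simp [hne]
    simp [PySem.Str.isIn, h, this]

-- B's accumulator loop is a map
theorem translate_foldl (cs : List Char) :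
    ∀ acc : List Char,
      cs.foldl (fun out c => out ++ [if c = '/' ∨ c = '.' ∨ c = '_' then ' ' else c]) acc
        = acc ++ cs.map (fun c => if c = '/' ∨ c = '.' ∨ c = '_' then ' ' else c) := by
  induction cs with
  | nil => intro acc; simp
  | cons c t ih => intro acc; simp [ih]

-- A's startswith/slice stripping equals B's take/drop stripping, on the character level
theorem strip_eq (url : String) :
    (if PySem.Str.startswith url "http://" then PySem.Str.slice url (some 7) none
     else if PySem.Str.startswith url "https://" then PySem.Str.slice url (some 8) none
     else url).toList = pvStripScheme url.toList := by
  have h7 : PySem.Str.startswith url "http://" = true ↔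
      url.toList.take 7 = ['h','t','t','p',':','/','/'] := by
    rw [show PySem.Str.startswith url "http://"
          = PySem.Chars.startswith url.toList "http://".toList from rfl,
        PySem.Chars.startswith_iff]
    constructor
    · intro h; have := List.prefix_iff_eq_take.mp h; exact this.symm
    · intro h; exact List.prefix_iff_eq_take.mpr h.symm
  have h8 : PySem.Str.startswith url "https://" = true ↔
      url.toList.take 8 = ['h','t','t','p','s',':','/','/'] := by
    rw [show PySem.Str.startswith url "https://"
          = PySem.Chars.startswith url.toList "https://".toList from rfl,
        PySem.Chars.startswith_iff]
    constructor
    · intro h; have := List.prefix_iff_eq_take.mp h; exact this.symm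
    · intro h; exact List.prefix_iff_eq_take.mpr h.symm
  have s7 : (PySem.Str.slice url (some 7) none).toList = url.toList.drop 7 := by
    simp [PySem.Str.toList_slice, PySem.Chars.slice_eq_listSlice,
          PySem.List.slice_from url.toList (show (0:Int) ≤ 7 by norm_num)]
  have s8 : (PySem.Str.slice url (some 8) none).toList = url.toList.drop 8 := by
    simp [PySem.Str.toList_slice, PySem.Chars.slice_eq_listSlice,
          PySem.List.slice_from url.toList (show (0:Int) ≤ 8 by norm_num)]
  unfold pvStripScheme
  by_cases hA : PySem.Str.startswith url "http://"
  · rw [if_pos hA, if_pos (h7.mp hA), s7]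
  · have hA' : ¬ url.toList.take 7 = ['h','t','t','p',':','/','/'] := fun h =>
      hA (h7.mpr h)
    by_cases hB : PySem.Str.startswith url "https://"
    · rw [if_neg hA, if_pos hB, if_neg hA', if_pos (h8.mp hB), s8]
    · have hB' : ¬ url.toList.take 8 = ['h','t','t','p','s',':','/','/'] := fun h =>
        hB (h8.mpr h)
      rw [if_neg hA, if_neg hB, if_neg hA', if_neg hB']

-- ===== VERDICT (by name: the statement is the Claim_ definition above) =====
theorem prepare_url_for_tokenizing_spec : Claim_equal_prepare_url_for_tokenizing := by
  intro url _
  unfold Spec_prepare_url_for_tokenizing prepare_url_for_tokenizing prepare_url_for_tokenizing_alt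
  have hs := strip_eq url
  generalize hS : (if PySem.Str.startswith url "http://" then PySem.Str.slice url (some 7) none
    else if PySem.Str.startswith url "https://" then PySem.Str.slice url (some 8) none
    else url) = s at hs ⊢
  show List.foldl _ s _ = _
  simp only [List.foldl_cons, List.foldl_nil, step_eq_map]
  rw [pvTranslate, translate_foldl, ← hs]
  simp only [String.toList_ofList, List.map_map, List.nil_append]
  congr 1
  apply List.map_congr_left
  intro c _
  by_cases h1 : c = '/' <;> by_cases h2 : c = '.' <;> by_cases h3 : c = '_' <;>
    simp_all [Function.comp]
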